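-- pv_equiv track=rewrite | github.com/daniel-reich/ubiquitous-fiesta | 26P2iwW5WfwPGJyWE_15.py | possibly_perfect
-- ===== SOURCE A (Python) =====
-- def possibly_perfect(key, answers):
--   correct = []
--   incorrect = []
--   for i in range(len(key)):
--     if key[i] == "_":
--       correct.append(i)
--       incorrect.append(i)
--     else:
--       if key[i] == answers[i]:
--         correct.append(i)
--       else:
--         incorrect.append(i)
--   if max([len(correct), len(incorrect)]) == len(key):
--     return True
--   return False
-- ===== SOURCE B (Python) =====
-- def possibly_perfect(key, answers):
--   nonwild = [(k, answers[i]) for i, k in enumerate(key) if k != "_"]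
--   return all(k == a for k, a in nonwild) or all(k != a for k, a in nonwild)
-- ===== Notes on version B (the rewrite author's own statement) =====
-- stated objective: simpler
-- what changed: B replaces the two index-accumulating lists and the max-of-lengths test with a single comprehension collecting the non-wildcard (key, answer) pairs followed by two all() checks combined with or.
import Mathlib
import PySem

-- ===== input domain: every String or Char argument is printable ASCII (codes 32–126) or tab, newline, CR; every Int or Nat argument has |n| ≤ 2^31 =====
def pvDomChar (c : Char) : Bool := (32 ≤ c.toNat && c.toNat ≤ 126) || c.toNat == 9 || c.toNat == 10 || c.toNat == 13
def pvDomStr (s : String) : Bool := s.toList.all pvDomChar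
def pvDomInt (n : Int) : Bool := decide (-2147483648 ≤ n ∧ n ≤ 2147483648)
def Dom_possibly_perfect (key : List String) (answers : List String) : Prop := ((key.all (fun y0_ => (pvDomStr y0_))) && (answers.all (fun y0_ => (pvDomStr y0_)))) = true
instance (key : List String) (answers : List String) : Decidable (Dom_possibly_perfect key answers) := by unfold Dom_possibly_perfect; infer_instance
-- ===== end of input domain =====

-- B replaces the two index-accumulating lists and max-of-lengths test by a comprehension of
-- non-wildcard (key, answer) pairs and two all() checks combined with or (objective: simpler).


-- ===== PORT A =====
-- literal port: fold over range(len(key)) building the two index lists, then the max test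
def possibly_perfect (key : List String) (answers : List String) : Bool :=
  let s := (PySem.List.pyRange 0 (key.length : Int) 1).foldl
    (fun (ci : List Int × List Int) i =>
      if PySem.List.pyGetD key i "" == "_" then (ci.1 ++ [i], ci.2 ++ [i])
      else if PySem.List.pyGetD key i "" == PySem.List.pyGetD answers i "" then
        (ci.1 ++ [i], ci.2)
      else (ci.1, ci.2 ++ [i]))
    ([], [])
  if max s.1.length s.2.length == key.length then true else false

-- ===== PORT B =====
-- literal port of Source B: comprehension over enumerate(key) filtering wildcards, then two all's
def possibly_perfect_alt (key : List String) (answers : List String) : Bool :=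
  let nonwild := ((PySem.List.enumerate key 0).filter (fun p => p.2 != "_")).map
    (fun p => (p.2, PySem.List.pyGetD answers p.1 ""))
  nonwild.all (fun p => p.1 == p.2) || nonwild.all (fun p => p.1 != p.2)

-- ===== PRECONDITION & SPEC =====
-- Pre_ excludes exactly the inputs where Python A raises IndexError: a non-wildcard position
-- of key with no corresponding answers entry (B raises there too).
def Pre_possibly_perfect (key : List String) (answers : List String) : Prop :=
  ∀ i, (h : i < key.length) → key[i] ≠ "_" → i < answers.length
instance (key : List String) (answers : List String) : Decidable (Pre_possibly_perfect key answers) := by unfold Pre_possibly_perfect; infer_instance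
def pvWitness_possibly_perfect : List String × List String := (["a", "_", "b"], ["a", "x", "c"])

def Spec_possibly_perfect (key : List String) (answers : List String) (out : Bool) : Prop := out = possibly_perfect_alt key answers
instance (key : List String) (answers : List String) (out : Bool) : Decidable (Spec_possibly_perfect key answers out) := by unfold Spec_possibly_perfect; infer_instance

-- ===== CLAIM (what is proved, stated in full; the proofs are below) =====
def Claim_equal_possibly_perfect : Prop := ∀ (key : List String) (answers : List String), Dom_possibly_perfect key answers → Pre_possibly_perfect key answers → Spec_possibly_perfect key answers (possibly_perfect key answers)

-- ===== LEMMAS AND PROOFS =====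

-- predicates "position i goes to correct / to incorrect"
def pvG1 (key answers : List String) (i : Nat) : Bool :=
  (PySem.List.pyGetD key (i : Int) "" == "_") ||
  (PySem.List.pyGetD key (i : Int) "" == PySem.List.pyGetD answers (i : Int) "")
def pvG2 (key answers : List String) (i : Nat) : Bool :=
  (PySem.List.pyGetD key (i : Int) "" == "_") ||
  (PySem.List.pyGetD key (i : Int) "" != PySem.List.pyGetD answers (i : Int) "")

-- lengths of A's accumulated lists = counts of positions satisfying pvG1 / pvG2
theorem pvFoldA (key answers : List String) (n : Nat) :
    (((PySem.List.pyRange 0 (n : Int) 1).foldl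
      (fun (ci : List Int × List Int) i =>
        if PySem.List.pyGetD key i "" == "_" then (ci.1 ++ [i], ci.2 ++ [i])
        else if PySem.List.pyGetD key i "" == PySem.List.pyGetD answers i "" then
          (ci.1 ++ [i], ci.2)
        else (ci.1, ci.2 ++ [i]))
      ([], [])).1.length = (List.range n).countP (pvG1 key answers)) ∧
    (((PySem.List.pyRange 0 (n : Int) 1).foldl
      (fun (ci : List Int × List Int) i =>
        if PySem.List.pyGetD key i "" == "_" then (ci.1 ++ [i], ci.2 ++ [i])
        else if PySem.List.pyGetD key i "" == PySem.List.pyGetD answers i "" then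
          (ci.1 ++ [i], ci.2)
        else (ci.1, ci.2 ++ [i]))
      ([], [])).2.length = (List.range n).countP (pvG2 key answers)) := by
  induction n with
  | zero => simp [PySem.List.pyRange]
  | succ m ih =>
    have hr : PySem.List.pyRange 0 ((m + 1 : Nat) : Int) 1
        = PySem.List.pyRange 0 (m : Int) 1 ++ [(m : Int)] := by
      push_cast
      exact PySem.List.pyRange_one_succ_right (by positivity)
    rw [hr, List.foldl_append, List.range_succ, List.countP_append, List.countP_append]
    obtain ⟨h1, h2⟩ := ih
    set s := (PySem.List.pyRange 0 (m : Int) 1).foldl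
      (fun (ci : List Int × List Int) i =>
        if PySem.List.pyGetD key i "" == "_" then (ci.1 ++ [i], ci.2 ++ [i])
        else if PySem.List.pyGetD key i "" == PySem.List.pyGetD answers i "" then
          (ci.1 ++ [i], ci.2)
        else (ci.1, ci.2 ++ [i]))
      ([], []) with hs
    simp only [List.foldl_cons, List.foldl_nil]
    by_cases hw : PySem.List.pyGetD key ((m : Nat) : Int) "" = "_"
    · have hw' : key[m]?.getD "" = "_" := by simpa using hw
      refine ⟨?_, ?_⟩ <;> rw [if_pos (by simpa using hw)] <;>
        simp [pvG1, pvG2, hw', h1, h2, List.countP_cons]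
    · have hw' : ¬ key[m]?.getD "" = "_" := by simpa using hw
      by_cases hm : PySem.List.pyGetD key ((m : Nat) : Int) ""
          = PySem.List.pyGetD answers ((m : Nat) : Int) ""
      · have hm' : key[m]?.getD "" = answers[m]?.getD "" := by simpa using hm
        refine ⟨?_, ?_⟩ <;>
          rw [if_neg (by simpa using hw), if_pos (by simpa using hm)] <;>
          simp [pvG1, pvG2, hw', hm'.symm, h1, h2, List.countP_cons]
      · have hm' : ¬ key[m]?.getD "" = answers[m]?.getD "" := by simpa using hm
        refine ⟨?_, ?_⟩ <;>
          rw [if_neg (by simpa using hw), if_neg (by simpa using hm)] <;>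
          simp [pvG1, pvG2, hw', hm', h1, h2, List.countP_cons]

theorem possibly_perfect_eq_decide (key answers : List String) :
    possibly_perfect key answers
      = decide ((∀ i < key.length, pvG1 key answers i = true) ∨
                (∀ i < key.length, pvG2 key answers i = true)) := by
  unfold possibly_perfect
  obtain ⟨h1, h2⟩ := pvFoldA key answers key.length
  simp only [h1, h2]
  have c1 : (List.range key.length).countP (pvG1 key answers) ≤ key.length := by
    simpa using List.countP_le_length (p := pvG1 key answers) (l := List.range key.length)
  have c2 : (List.range key.length).countP (pvG2 key answers) ≤ key.length := by
    simpa using List.countP_le_length (p := pvG2 key answers) (l := List.range key.length)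
  by_cases h : max ((List.range key.length).countP (pvG1 key answers))
      ((List.range key.length).countP (pvG2 key answers)) = key.length
  · have hcase : (List.range key.length).countP (pvG1 key answers) = key.length ∨
        (List.range key.length).countP (pvG2 key answers) = key.length := by omega
    rw [if_pos (by simpa using h)]
    rcases hcase with h' | h'
    · have hall : ∀ i < key.length, pvG1 key answers i = true := fun i hi =>
        List.countP_eq_length.mp (by simpa using h') i (List.mem_range.mpr hi)
      exact (decide_eq_true (Or.inl hall)).symm
    · have hall : ∀ i < key.length, pvG2 key answers i = true := fun i hi =>
        List.countP_eq_length.mp (by simpa using h') i (List.mem_range.mpr hi)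
      exact (decide_eq_true (Or.inr hall)).symm
  · rw [if_neg (by simpa using h)]
    have hn1 : ¬ ∀ i < key.length, pvG1 key answers i = true := by
      intro hall
      have : (List.range key.length).countP (pvG1 key answers) = key.length := by
        rw [List.countP_eq_length.mpr (fun i hi => hall i (List.mem_range.mp hi))]
        simp
      omega
    have hn2 : ¬ ∀ i < key.length, pvG2 key answers i = true := by
      intro hall
      have : (List.range key.length).countP (pvG2 key answers) = key.length := by
        rw [List.countP_eq_length.mpr (fun i hi => hall i (List.mem_range.mp hi))]
        simp
      omega
    symm
    simp only [decide_eq_false_iff_not, not_or]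
    exact ⟨hn1, hn2⟩

-- B's all over the comprehension, characterised pointwise
theorem pvAltAll (key answers : List String) (pred : String → String → Bool) :
    ((((PySem.List.enumerate key 0).filter (fun p => p.2 != "_")).map
        (fun p => (p.2, PySem.List.pyGetD answers p.1 ""))).all
      (fun p => pred p.1 p.2)) = true
    ↔ ∀ k, (h : k < key.length) → key[k] ≠ "_" →
        pred key[k] (PySem.List.pyGetD answers ((k : Nat) : Int) "") = true := by
  simp only [List.all_eq_true, List.mem_map, List.mem_filter, PySem.List.mem_enumerate_iff]
  constructor
  · intro h k hk hne
    have := h (key[k], PySem.List.pyGetD answers ((k : Nat) : Int) "")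
      ⟨(((k : Nat) : Int), key[k]), ⟨⟨k, hk, by simp⟩, by simpa using hne⟩, by simp⟩
    simpa using this
  · rintro h x ⟨p, ⟨⟨k, hk, rfl⟩, hne⟩, rfl⟩
    simpa using h k hk (by simpa using hne)

theorem pvG1_iff (key answers : List String) (i : Nat) (hi : i < key.length) :
    pvG1 key answers i = true
      ↔ (key[i] ≠ "_" → (key[i] == PySem.List.pyGetD answers ((i : Nat) : Int) "") = true) := by
  simp only [pvG1, PySem.List.pyGetD_natCast, List.getD_eq_getElem?_getD,
    List.getElem?_eq_getElem hi, Option.getD_some, Bool.or_eq_true, beq_iff_eq]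
  by_cases hw : key[i] = "_" <;> simp [hw]

theorem pvG2_iff (key answers : List String) (i : Nat) (hi : i < key.length) :
    pvG2 key answers i = true
      ↔ (key[i] ≠ "_" → (key[i] != PySem.List.pyGetD answers ((i : Nat) : Int) "") = true) := by
  simp only [pvG2, PySem.List.pyGetD_natCast, List.getD_eq_getElem?_getD,
    List.getElem?_eq_getElem hi, Option.getD_some, Bool.or_eq_true, beq_iff_eq, bne_iff_ne, ne_eq]
  by_cases hw : key[i] = "_" <;> simp [hw]

theorem possibly_perfect_alt_eq_decide (key answers : List String) :
    possibly_perfect_alt key answers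
      = decide ((∀ i < key.length, pvG1 key answers i = true) ∨
                (∀ i < key.length, pvG2 key answers i = true)) := by
  unfold possibly_perfect_alt
  rw [Bool.eq_iff_iff]
  simp only [Bool.or_eq_true, decide_eq_true_eq]
  constructor
  · rintro (h | h)
    · exact Or.inl fun i hi =>
        (pvG1_iff key answers i hi).mpr fun hne =>
          (pvAltAll key answers (fun a b => a == b)).mp h i hi hne
    · exact Or.inr fun i hi =>
        (pvG2_iff key answers i hi).mpr fun hne =>
          (pvAltAll key answers (fun a b => a != b)).mp h i hi hne
  · rintro (h | h)
    · exact Or.inl ((pvAltAll key answers (fun a b => a == b)).mpr fun k hk hne =>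
        (pvG1_iff key answers k hk).mp (h k hk) hne)
    · exact Or.inr ((pvAltAll key answers (fun a b => a != b)).mpr fun k hk hne =>
        (pvG2_iff key answers k hk).mp (h k hk) hne)

-- ===== VERDICT (by name: the statement is the Claim_ definition above) =====
theorem possibly_perfect_spec : Claim_equal_possibly_perfect := by
  intro key answers _ _
  unfold Spec_possibly_perfect
  rw [possibly_perfect_eq_decide, possibly_perfect_alt_eq_decide]
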